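-- pv_equiv track=rewrite | github.com/abulena1/Evax | evax.py | to_csharp_array
-- ===== SOURCE A (Python) =====
-- def to_csharp_array(shellcode, var_name, items_per_line=15):
--     """Format shellcode as C# byte array"""
--     lines = []
--     current_line = []
--
--     for i, byte in enumerate(shellcode):
--         current_line.append(f"0x{byte:02x}")
--         if len(current_line) >= items_per_line:
--             lines.append(', '.join(current_line) + ',')
--             current_line = []
--
--     if current_line:
--         lines.append(', '.join(current_line))
--
--     formatted = '\n            '.join(lines)
--     return f"byte[] {var_name} = new byte[{len(shellcode)}] {{\n            {formatted}\n        }};"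
-- ===== SOURCE B (Python) =====
-- def to_csharp_array(shellcode, var_name, items_per_line=15):
--     """Format shellcode as C# byte array"""
--     # chunk size must be positive; a non-positive items_per_line means one item per line
--     k = items_per_line if items_per_line > 0 else 1
--     hexes = [f"0x{byte:02x}" for byte in shellcode]
--     lines = []
--     while hexes:
--         chunk, hexes = hexes[:k], hexes[k:]
--         lines.append(', '.join(chunk) + (',' if len(chunk) == k else ''))
--     body = '\n            '.join(lines)
--     return f"byte[] {var_name} = new byte[{len(shellcode)}] {{\n            {body}\n        }};"
-- ===== Notes on version B (the rewrite author's own statement) =====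
-- stated objective: simpler
-- what changed: Replaces A's incremental counter/accumulator loop (append, flush on threshold, leftover handling after the loop) with a two-phase decomposition: map all bytes to hex strings once, then slice that list into fixed-size chunks, appending the trailing comma exactly when a chunk is full.
import Mathlib
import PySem

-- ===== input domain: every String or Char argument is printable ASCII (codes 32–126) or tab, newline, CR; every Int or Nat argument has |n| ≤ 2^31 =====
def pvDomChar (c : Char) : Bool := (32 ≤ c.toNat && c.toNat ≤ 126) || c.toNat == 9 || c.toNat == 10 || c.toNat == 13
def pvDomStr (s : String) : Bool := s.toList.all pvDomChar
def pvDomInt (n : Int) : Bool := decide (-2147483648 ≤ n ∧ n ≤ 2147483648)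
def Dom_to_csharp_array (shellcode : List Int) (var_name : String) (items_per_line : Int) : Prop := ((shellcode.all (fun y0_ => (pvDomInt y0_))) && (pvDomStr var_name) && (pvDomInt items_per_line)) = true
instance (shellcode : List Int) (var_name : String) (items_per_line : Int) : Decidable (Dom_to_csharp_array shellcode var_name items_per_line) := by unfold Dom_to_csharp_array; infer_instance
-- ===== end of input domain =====

-- B replaces A's incremental flush-on-threshold accumulator loop with a map-then-chunk
-- decomposition (hex all bytes once, then slice off fixed-size chunks); same output, same cost.

-- f"0x{byte:02x}" for an arbitrary Python int: lowercase hex of |n|, zero-padded so the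
-- whole field (sign included) has at least 2 characters; exact for every Int.
def pyFmt02x (n : Int) : String :=
  if n < 0 then "-" ++ String.ofList (Nat.toDigits 16 n.natAbs)
  else
    let ds := Nat.toDigits 16 n.toNat
    if ds.length < 2 then String.ofList ('0' :: ds) else String.ofList ds

-- ===== PORT A =====
def to_csharp_array (shellcode : List Int) (var_name : String) (items_per_line : Int) : String :=
  -- 'for i, byte in enumerate(shellcode)' with state (lines, current_line); the index i is unused
  let st := shellcode.foldl
    (fun (st : List String × List String) (byte : Int) =>
      let cur := st.2 ++ ["0x" ++ pyFmt02x byte]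
      if items_per_line ≤ (cur.length : Int) then
        (st.1 ++ [PySem.Str.join ", " cur ++ ","], ([] : List String))
      else (st.1, cur))
    ([], [])
  let lines := if st.2 = [] then st.1 else st.1 ++ [PySem.Str.join ", " st.2]
  let formatted := PySem.Str.join "\n            " lines
  "byte[] " ++ var_name ++ " = new byte[" ++ PySem.Int.toStr (shellcode.length : Int) ++
    "] {\n            " ++ formatted ++ "\n        };"

-- ===== PORT B =====
-- the 'while hexes:' loop of Source B: take one chunk off the front, emit its line, recurse on the rest
-- (hexes[:k] / hexes[k:] with k a positive Python int are exactly take k / drop k)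
def pvChunkLines (k : Nat) (hk : 0 < k) (hexes : List String) : List String :=
  match hexes with
  | [] => []
  | h :: t =>
      let chunk := (h :: t).take k
      (PySem.Str.join ", " chunk ++ (if chunk.length = k then "," else ""))
        :: pvChunkLines k hk ((h :: t).drop k)
termination_by hexes.length
decreasing_by simp; omega

def to_csharp_array_alt (shellcode : List Int) (var_name : String) (items_per_line : Int) : String :=
  -- k = items_per_line if items_per_line > 0 else 1  (a positive Python int, hence .toNat is exact)
  let k : Nat := (if 0 < items_per_line then items_per_line else 1).toNat
  let hexes := shellcode.map (fun byte => "0x" ++ pyFmt02x byte)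
  let lines := pvChunkLines k (by show 0 < (if 0 < items_per_line then items_per_line else 1).toNat; split <;> omega) hexes
  let body := PySem.Str.join "\n            " lines
  "byte[] " ++ var_name ++ " = new byte[" ++ PySem.Int.toStr (shellcode.length : Int) ++
    "] {\n            " ++ body ++ "\n        };"

-- ===== PRECONDITION & SPEC =====
def Spec_to_csharp_array (shellcode : List Int) (var_name : String) (items_per_line : Int) (out : String) : Prop := out = to_csharp_array_alt shellcode var_name items_per_line
instance (shellcode : List Int) (var_name : String) (items_per_line : Int) (out : String) : Decidable (Spec_to_csharp_array shellcode var_name items_per_line out) := by unfold Spec_to_csharp_array; infer_instance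

-- ===== CLAIM (what is proved, stated in full; the proofs are below) =====
def Claim_equal_to_csharp_array : Prop := ∀ (shellcode : List Int) (var_name : String) (items_per_line : Int), Dom_to_csharp_array shellcode var_name items_per_line → Spec_to_csharp_array shellcode var_name items_per_line (to_csharp_array shellcode var_name items_per_line)

-- ===== LEMMAS AND PROOFS =====

-- A's flush test 'items_per_line <= len(cur)' on a NONEMPTY cur is exactly 'k <= cur.length'
-- for k = (if 0 < items_per_line then items_per_line else 1).toNat.
lemma pv_cond_iff (ipl : Int) (cur : List String) (hne : cur ≠ []) :
    (ipl ≤ (cur.length : Int)) ↔ ((if 0 < ipl then ipl else 1).toNat ≤ cur.length) := by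
  have : 1 ≤ cur.length := List.length_pos_iff.mpr hne
  split <;> omega

-- Invariant of A's loop: with cur.length < k, running A's fold and then appending the
-- leftover partial line produces exactly `lines ++ pvChunkLines k (cur ++ xs.map hex)`.
lemma pv_loop_eq (ipl : Int) (k : Nat) (hk : 0 < k)
    (hcond : ∀ cur : List String, cur ≠ [] → ((ipl ≤ (cur.length : Int)) ↔ k ≤ cur.length))
    (xs : List Int) : ∀ (cur lines : List String),
    cur.length < k →
    (let st := xs.foldl
        (fun (st : List String × List String) (byte : Int) =>
          let cur := st.2 ++ ["0x" ++ pyFmt02x byte]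
          if ipl ≤ (cur.length : Int) then
            (st.1 ++ [PySem.Str.join ", " cur ++ ","], ([] : List String))
          else (st.1, cur))
        (lines, cur)
      if st.2 = [] then st.1 else st.1 ++ [PySem.Str.join ", " st.2])
    = lines ++ pvChunkLines k hk
        (cur ++ xs.map (fun byte => "0x" ++ pyFmt02x byte)) := by
  induction xs with
  | nil =>
      intro cur lines hcur
      simp only [List.foldl_nil, List.map_nil, List.append_nil]
      cases cur with
      | nil => rw [pvChunkLines.eq_def]; simp
      | cons c cs =>
        rw [pvChunkLines.eq_def]
        have htake : (c :: cs).take k = c :: cs := List.take_of_length_le (by omega)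
        have hdrop : (c :: cs).drop k = [] := List.drop_eq_nil_of_le (by omega)
        simp only [htake, hdrop]
        rw [pvChunkLines.eq_def]
        have hne : ¬ (cs.length + 1 = k) := by simp at hcur; omega
        simp [hne]
  | cons x xs ih =>
      intro cur lines hcur
      simp only [List.foldl_cons, List.map_cons]
      set h := "0x" ++ pyFmt02x x with hh
      by_cases hc : ipl ≤ ((cur ++ [h]).length : Int)
      · have hk2 : k ≤ (cur ++ [h]).length := (hcond (cur ++ [h]) (by simp)).mp hc
        have hlen : (cur ++ [h]).length = k := by simp at hk2 ⊢; omega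
        simp only [hc, if_pos]
        rw [ih [] (lines ++ [PySem.Str.join ", " (cur ++ [h]) ++ ","]) (by simpa using hk)]
        have hassoc : cur ++ h :: xs.map (fun byte => "0x" ++ pyFmt02x byte)
            = (cur ++ [h]) ++ xs.map (fun byte => "0x" ++ pyFmt02x byte) := by simp
        rw [hassoc]
        obtain ⟨c, cs, hcc⟩ : ∃ c cs, cur ++ [h] = c :: cs := by
          cases hx : cur ++ [h] with
          | nil => simp at hx
          | cons a b => exact ⟨a, b, rfl⟩
        rw [hcc]
        conv_rhs => rw [pvChunkLines.eq_def]
        have htake : ((c :: cs) ++ xs.map (fun byte => "0x" ++ pyFmt02x byte)).take k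
            = c :: cs := by
          rw [List.take_append_of_le_length (by rw [← hcc, hlen])]
          exact List.take_of_length_le (by rw [← hcc, hlen])
        have hdrop : ((c :: cs) ++ xs.map (fun byte => "0x" ++ pyFmt02x byte)).drop k
            = xs.map (fun byte => "0x" ++ pyFmt02x byte) := by
          rw [List.drop_append_of_le_length (by rw [← hcc, hlen])]
          rw [List.drop_eq_nil_of_le (by rw [← hcc, hlen]), List.nil_append]
        have hck : (c :: cs).length = k := by rw [← hcc]; exact hlen
        simp only [List.cons_append] at htake hdrop ⊢
        simp only [htake, hdrop]
        have hck' : cs.length + 1 = k := by simpa using hck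
        simp [hck', List.append_assoc]
      · have hk2 : ¬ k ≤ (cur ++ [h]).length :=
          fun hle => hc ((hcond (cur ++ [h]) (by simp)).mpr hle)
        simp only [hc, if_false]
        rw [ih (cur ++ [h]) lines (by simp at hk2 ⊢; omega)]
        simp

-- ===== VERDICT (by name: the statement is the Claim_ definition above) =====
theorem to_csharp_array_spec : Claim_equal_to_csharp_array := by
  intro shellcode var_name items_per_line _
  unfold Spec_to_csharp_array
  have hk : 0 < (if 0 < items_per_line then items_per_line else 1).toNat := by split <;> omega
  have hlines := pv_loop_eq items_per_line _ hk (pv_cond_iff items_per_line) shellcode [] []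
    (by simpa using hk)
  simp only [List.nil_append] at hlines
  simp only [to_csharp_array, to_csharp_array_alt]
  rw [hlines]
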